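-- pv_equiv track=rewrite | github.com/Common-Leap/Hitbox-editor | find_hash3.py | try_all
-- ===== SOURCE A (Python) =====
-- def try_all(name):
--     variants = []
--     variants.append(name)
--     variants.append(name.removeprefix("ef_"))
--     # Also try just the base part
--     parts = name.split("_")
--     for i in range(1, len(parts)):
--         variants.append("_".join(parts[i:]))
--     return variants
-- ===== SOURCE B (Python) =====
-- def try_all(name):
--     variants = [name, name[3:] if name.startswith("ef_") else name]
--     # One scan: each '_' at index i contributes the tail name[i+1:] directly,
--     # no split/join reassembly.
--     for i, c in enumerate(name):
--         if c == "_":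
--             variants.append(name[i+1:])
--     return variants
-- ===== Notes on version B (the rewrite author's own statement) =====
-- stated objective: alternative
-- what changed: B drops the split-into-parts plus join-of-each-tail reassembly entirely: it makes one scan over the characters and, for each underscore at index i, appends the direct slice name[i+1:].
import Mathlib
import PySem

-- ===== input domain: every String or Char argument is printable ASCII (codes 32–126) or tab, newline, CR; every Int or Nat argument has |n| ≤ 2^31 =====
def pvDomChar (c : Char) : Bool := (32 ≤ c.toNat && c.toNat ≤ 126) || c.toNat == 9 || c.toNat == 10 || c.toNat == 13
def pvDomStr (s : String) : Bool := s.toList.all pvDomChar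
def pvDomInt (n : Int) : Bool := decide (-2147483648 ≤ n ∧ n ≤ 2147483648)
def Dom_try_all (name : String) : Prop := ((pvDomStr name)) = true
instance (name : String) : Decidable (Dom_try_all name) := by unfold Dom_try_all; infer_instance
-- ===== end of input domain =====

-- B replaces A's split-into-parts plus join-of-each-tail reassembly by one scan that appends
-- the direct slice name[i+1:] at each underscore (alternative decomposition, same cost).

-- ===== PORT A =====
-- str.removeprefix, ported by hand (exact: Python returns s unchanged when the prefix is absent)
def pyRemoveprefix (s pre : List Char) : List Char :=
  if PySem.Chars.startswith s pre then s.drop pre.length else s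

def try_all (name : String) : List String :=
  let n := name.toList
  let variants : List (List Char) := []
  let variants := variants ++ [n]
  let variants := variants ++ [pyRemoveprefix n ['e', 'f', '_']]
  let parts := PySem.Chars.splitOn n ['_']
  let variants := (PySem.List.pyRange 1 (parts.length : Int) 1).foldl
    (fun vs i => vs ++ [PySem.Chars.join ['_'] (PySem.List.slice parts (some i) none)]) variants
  variants.map String.ofList

-- ===== PORT B =====
def try_all_alt (name : String) : List String :=
  let n := name.toList
  let variants : List (List Char) :=
    [n, if PySem.Chars.startswith n ['e', 'f', '_'] then n.drop 3 else n]
  let variants := (PySem.List.enumerate n 0).foldl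
    (fun vs p => if p.2 = '_' then vs ++ [PySem.List.slice n (some (p.1 + 1)) none] else vs)
    variants
  variants.map String.ofList

-- ===== PRECONDITION & SPEC =====
def Spec_try_all (name : String) (out : List String) : Prop := out = try_all_alt name
instance (name : String) (out : List String) : Decidable (Spec_try_all name out) := by unfold Spec_try_all; infer_instance

-- ===== CLAIM (what is proved, stated in full; the proofs are below) =====
def Claim_equal_try_all : Prop := ∀ (name : String), Dom_try_all name → Spec_try_all name (try_all name)

-- ===== LEMMAS AND PROOFS =====

-- B's suffix list, structurally: the tail after each '_', in order.
def suffixesB : List Char → List (List Char)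
  | [] => []
  | c :: rest => if c = '_' then rest :: suffixesB rest else suffixesB rest

-- A's suffix list over the parts: the '_'-join of every nonempty tail of the parts.
def joinTails : List (List Char) → List (List Char)
  | [] => []
  | q :: rest => PySem.Chars.join ['_'] (q :: rest) :: joinTails rest

theorem modifyHead_id' {α : Type} (l : List α) : List.modifyHead (fun x => x) l = l := by
  cases l <;> simp

theorem splitOn_ne_nil' (rest : List Char) : List.splitOn '_' rest ≠ [] := by
  induction rest with
  | nil => simp [List.splitOn]
  | cons c t ih =>
    simp only [List.splitOn, List.splitOnP_cons] at *
    split <;> simp_all [List.modifyHead]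
    cases h : List.splitOnP (fun x => x == '_') t <;> simp_all

theorem splitOn_cons' (c x : Char) (rest : List Char) :
    (c :: rest).splitOn x =
      if c = x then [] :: rest.splitOn x else (rest.splitOn x).modifyHead (List.cons c) := by
  simp [List.splitOn, List.splitOnP_cons, beq_iff_eq]

-- PySem's fuel-based splitOn.go computes core List.splitOn (single-char separator)
theorem go_spec (fuel : Nat) (l cur : List Char) (acc : List (List Char))
    (h : l.length ≤ fuel) :
    PySem.Chars.splitOn.go ['_'] fuel l cur acc =
      acc.reverse ++ (l.splitOn '_').modifyHead (cur.reverse ++ ·) := by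
  induction fuel generalizing l cur acc with
  | zero =>
    have hl : l = [] := by cases l <;> simp_all
    subst hl
    simp [PySem.Chars.splitOn.go, List.splitOn_nil]
  | succ fuel ih =>
    cases l with
    | nil => simp [PySem.Chars.splitOn.go, List.splitOn_nil]
    | cons c rest =>
      by_cases hc : c = '_'
      · subst hc
        have hp : List.isPrefixOf ['_'] ('_' :: rest) = true := by simp [List.isPrefixOf]
        simp only [PySem.Chars.splitOn.go, hp, if_pos]
        rw [ih _ _ _ (by simpa using Nat.le_of_succ_le_succ h)]
        rw [splitOn_cons']
        simp [modifyHead_id']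
      · have hp : List.isPrefixOf ['_'] (c :: rest) = false := by
          simp [List.isPrefixOf]; exact fun h => hc h.symm
        simp only [PySem.Chars.splitOn.go, hp, Bool.false_eq_true, if_neg, not_false_iff]
        rw [ih _ _ _ (by simpa using Nat.le_of_succ_le_succ h)]
        rw [splitOn_cons', if_neg hc]
        rcases hsp : rest.splitOn '_' with _ | ⟨q, t⟩
        · exact absurd hsp (splitOn_ne_nil' rest)
        · simp

theorem splitOn_bridge (l : List Char) :
    PySem.Chars.splitOn l ['_'] = l.splitOn '_' := by
  rw [PySem.Chars.splitOn, go_spec _ _ _ _ (Nat.le_succ _)]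
  rcases h : l.splitOn '_' with _ | ⟨q, t⟩
  · exact absurd h (splitOn_ne_nil' l)
  · simp

theorem joinTails_range (qs : List (List Char)) :
    (List.range qs.length).map (fun k => PySem.Chars.join ['_'] (qs.drop k)) = joinTails qs := by
  induction qs with
  | nil => simp [joinTails]
  | cons q rest ih =>
    rw [List.length_cons, List.range_succ_eq_map]
    simp only [List.map_cons, List.map_map, List.drop_zero]
    rw [joinTails]
    simpa [Function.comp] using ih

-- A's range loop, as a map over the parts, is the join of every proper tail
theorem amap (ps : List (List Char)) :
    (PySem.List.pyRange 1 (ps.length : Int) 1).map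
        (fun i => PySem.Chars.join ['_'] (PySem.List.slice ps (some i) none)) =
      joinTails ps.tail := by
  cases ps with
  | nil => simp [PySem.List.pyRange_one_eq_nil, joinTails]
  | cons p qs =>
    rw [PySem.List.pyRange_one]
    have h1 : ((((p :: qs).length : Int) - 1)).toNat = qs.length := by
      simp
    rw [h1, List.map_map, List.tail_cons]
    rw [← joinTails_range qs]
    apply List.map_congr_left
    intro k hk
    have : PySem.List.slice (p :: qs) (some ((1 : Int) + (k : Int))) none = qs.drop k := by
      have : (1 : Int) + (k : Int) = ((k + 1 : Nat) : Int) := by push_cast; ring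
      rw [this, PySem.List.slice_from_natCast]
      simp
    simp [this]

-- the joins of the split's tails ARE the direct tails after each underscore
theorem splitOn_suffixes (l : List Char) :
    joinTails ((l.splitOn '_').tail) = suffixesB l := by
  induction l with
  | nil => simp [List.splitOn_nil, joinTails, suffixesB]
  | cons c rest ih =>
    rw [splitOn_cons']
    by_cases hc : c = '_'
    · rw [if_pos hc, List.tail_cons]
      rcases h : rest.splitOn '_' with _ | ⟨q, t⟩
      · exact absurd h (splitOn_ne_nil' rest)
      · rw [joinTails]
        have hj : PySem.Chars.join ['_'] (q :: t) = rest := by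
          have := List.intercalate_splitOn rest '_'
          rw [h] at this
          simpa [PySem.Chars.join] using this
        rw [hj]
        have : joinTails t = suffixesB rest := by
          rw [← ih, h, List.tail_cons]
        rw [this, suffixesB, if_pos hc]
    · rw [if_neg hc, suffixesB, if_neg hc, ← ih]
      rcases h : rest.splitOn '_' with _ | ⟨q, t⟩
      · exact absurd h (splitOn_ne_nil' rest)
      · simp [List.modifyHead]

-- B's enumerate loop collects exactly the direct tails after each underscore
theorem bfold (n : List Char) (k : Nat) (l : List Char) (acc : List (List Char))
    (h : n.drop k = l) :
    (PySem.List.enumerate l (k : Int)).foldl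
        (fun vs p => if p.2 = '_' then vs ++ [PySem.List.slice n (some (p.1 + 1)) none] else vs)
        acc = acc ++ suffixesB l := by
  induction l generalizing k acc with
  | nil => simp [PySem.List.enumerate, suffixesB]
  | cons c rest ih =>
    have hrest : n.drop (k + 1) = rest := by
      rw [← List.drop_drop]
      rw [h]
      simp
    rw [PySem.List.enumerate_cons]
    simp only [List.foldl_cons]
    have hcast : (k : Int) + 1 = ((k + 1 : Nat) : Int) := by push_cast; ring
    by_cases hc : c = '_'
    · rw [if_pos hc]
      have hslice : PySem.List.slice n (some ((k : Int) + 1)) none = rest := by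
        rw [hcast, PySem.List.slice_from_natCast, hrest]
      rw [hslice, hcast, ih (k + 1) _ hrest]
      rw [suffixesB, if_pos hc]
      simp
    · rw [if_neg hc, hcast, ih (k + 1) _ hrest, suffixesB, if_neg hc]

theorem try_all_eq_alt (name : String) : try_all name = try_all_alt name := by
  unfold try_all try_all_alt
  simp only []
  rw [PySem.List.foldl_append_singleton_eq_map]
  rw [amap, splitOn_bridge, splitOn_suffixes]
  have h0 : (0 : Int) = ((0 : Nat) : Int) := by norm_num
  rw [h0, bfold name.toList 0 name.toList _ (by simp)]
  simp [pyRemoveprefix]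

-- ===== VERDICT (by name: the statement is the Claim_ definition above) =====
theorem try_all_spec : Claim_equal_try_all := by
  intro name _
  unfold Spec_try_all
  exact try_all_eq_alt name
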